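-- pv_equiv track=rewrite | github.com/SebastianDelgad/Trabajo-de-Grado | Sentiment-Analysis/OrdenResultados.py | cursos
-- ===== SOURCE A (Python) =====
-- def cursos(datos):
--     curso = []
--     nombreCurso = ""
--     validar = 0
--
--     for item in datos:
--         for word in item:
--             if word == "-":
--                 validar = 1
--             else:
--                 if validar == 1:
--                     nombreCurso += word
--
--         curso.append(nombreCurso.strip())
--         validar = 0
--         nombreCurso = ""
--     return curso
-- ===== SOURCE B (Python) =====
-- def _after_dash(item):
--     if "-" in item:
--         i = item.index("-")
--         return "".join(w for w in item[i + 1:] if w != "-").strip()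
--     return ""
--
--
-- def cursos(datos):
--     return [_after_dash(item) for item in datos]
-- ===== Notes on version B (the rewrite author's own statement) =====
-- stated objective: simpler
-- what changed: Replaces A's stateful flag-and-accumulator scan (validar/nombreCurso mutated across the inner loop) with a direct per-item expression: locate the first "-" with index, slice off everything up to and including it, filter out remaining "-" words, join and strip.
import Mathlib
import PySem

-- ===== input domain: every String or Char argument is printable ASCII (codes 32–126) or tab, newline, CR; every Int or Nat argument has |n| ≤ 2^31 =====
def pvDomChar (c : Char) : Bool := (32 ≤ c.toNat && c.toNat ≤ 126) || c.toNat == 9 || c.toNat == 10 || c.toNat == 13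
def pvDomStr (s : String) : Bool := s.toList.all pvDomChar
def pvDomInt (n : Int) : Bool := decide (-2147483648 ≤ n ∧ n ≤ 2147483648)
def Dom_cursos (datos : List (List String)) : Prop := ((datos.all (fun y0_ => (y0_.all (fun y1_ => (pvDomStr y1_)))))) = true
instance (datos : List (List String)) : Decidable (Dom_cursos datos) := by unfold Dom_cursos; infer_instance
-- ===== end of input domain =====

-- B replaces A's stateful flag/accumulator scan with a direct index-slice-filter-join per item (objective: simpler).

-- ===== PORT A =====
-- inner loop body: for word in item: if word == "-": validar = 1 else: if validar == 1: nombreCurso += word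
def cursosStep (s : String × Int) (word : String) : String × Int :=
  if word = "-" then (s.1, 1)
  else if s.2 = 1 then (s.1 ++ word, s.2)
  else s

def cursos (datos : List (List String)) : List String :=
  -- state: (curso, nombreCurso, validar); reset to "", 0 after each item as in A
  (datos.foldl (fun (st : List String × String × Int) item =>
      let inner := item.foldl cursosStep (st.2.1, st.2.2)
      (st.1 ++ [PySem.Str.strip inner.1], "", 0)) ([], "", 0)).1

-- ===== PORT B =====
def afterDash (item : List String) : String :=
  if "-" ∈ item then
    match PySem.List.index? item "-" with
    | some i =>
        PySem.Str.strip (PySem.Str.join ""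
          ((PySem.List.slice item (some ((i : Int) + 1)) none).filter (fun w => w ≠ "-")))
    | none => ""   -- unreachable: "-" ∈ item
  else ""

def cursos_alt (datos : List (List String)) : List String :=
  datos.map afterDash

-- ===== PRECONDITION & SPEC =====
def Spec_cursos (datos : List (List String)) (out : List String) : Prop := out = cursos_alt datos
instance (datos : List (List String)) (out : List String) : Decidable (Spec_cursos datos out) := by unfold Spec_cursos; infer_instance

-- ===== CLAIM (what is proved, stated in full; the proofs are below) =====
def Claim_equal_cursos : Prop := ∀ (datos : List (List String)), Dom_cursos datos → Spec_cursos datos (cursos datos)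

-- ===== LEMMAS AND PROOFS =====

-- "".join of strings is plain concatenation, one cons at a time
theorem join_empty_cons (w : String) (ws : List String) :
    PySem.Str.join "" (w :: ws) = w ++ PySem.Str.join "" ws := by
  apply String.toList_inj.mp
  simp [PySem.Str.toList_join, List.map_cons]
  induction ws with
  | nil => simp [PySem.Chars.join_nil, PySem.Chars.join_singleton]
  | cons x t ih => simp [PySem.Chars.join_cons_cons]

theorem join_empty_nil : PySem.Str.join "" ([] : List String) = "" := by
  apply String.toList_inj.mp
  simp [PySem.Str.toList_join, PySem.Chars.join_nil]

-- once validar = 1, the inner loop appends every non-dash word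
theorem foldl_step_one (item : List String) (acc : String) :
    item.foldl cursosStep (acc, 1) =
      (acc ++ PySem.Str.join "" (item.filter (fun w => w ≠ "-")), 1) := by
  induction item generalizing acc with
  | nil => simp [join_empty_nil]
  | cons w t ih =>
    by_cases hw : w = "-"
    · simp [List.foldl_cons, cursosStep, hw, ih]
    · simp [List.foldl_cons, cursosStep, hw, ih, join_empty_cons, String.append_assoc]

-- the inner loop from the reset state, characterised by the first dash position
theorem foldl_step_zero (item : List String) :
    item.foldl cursosStep ("", 0) =
      match PySem.List.index? item "-" with
      | some i => (PySem.Str.join "" ((item.drop (i + 1)).filter (fun w => w ≠ "-")), 1)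
      | none => ("", 0) := by
  induction item with
  | nil => simp [PySem.List.index?]
  | cons w t ih =>
    by_cases hw : w = "-"
    · subst hw
      rw [PySem.List.index?_cons_self]
      simpa [List.foldl_cons, cursosStep] using foldl_step_one t ""
    · rw [PySem.List.index?_cons_of_ne t hw]
      simp only [List.foldl_cons, cursosStep, if_neg hw]
      norm_num
      rw [ih]
      cases h : PySem.List.index? t "-" with
      | none => rw [← PySem.List.index?_eq_idxOf?, h]; simp
      | some j => rw [← PySem.List.index?_eq_idxOf?, h]; simp

theorem item_eq (item : List String) :
    PySem.Str.strip (item.foldl cursosStep ("", 0)).1 = afterDash item := by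
  rw [foldl_step_zero]
  unfold afterDash
  cases h : PySem.List.index? item "-" with
  | none =>
    have hm : "-" ∉ item := (PySem.List.index?_eq_none_iff item "-").mp h
    simp [hm]
    decide
  | some i =>
    have hm : "-" ∈ item := by
      rw [← PySem.List.index?_isSome_iff (xs := item) (v := "-"), h]; rfl
    have hc : ((i : Int) + 1) = ((i + 1 : Nat) : Int) := by push_cast; ring
    simp only [hm, if_pos, hc, PySem.List.slice_from_natCast]

theorem cursos_foldl (datos : List (List String)) (acc : List String) :
    (datos.foldl (fun (st : List String × String × Int) item =>
      let inner := item.foldl cursosStep (st.2.1, st.2.2)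
      (st.1 ++ [PySem.Str.strip inner.1], "", 0)) (acc, "", 0)).1
      = acc ++ datos.map afterDash := by
  induction datos generalizing acc with
  | nil => simp
  | cons item t ih => simp [List.foldl_cons, ih, item_eq]

-- ===== VERDICT (by name: the statement is the Claim_ definition above) =====
theorem cursos_spec : Claim_equal_cursos := by
  intro datos _
  show cursos datos = cursos_alt datos
  simpa [cursos, cursos_alt] using cursos_foldl datos []
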